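-- pv_equiv track=rewrite | github.com/ChaeyeonHan/Algorithm | 프로그래머스/1/258712. 가장 많이 받은 선물/가장 많이 받은 선물.py | solution
-- ===== SOURCE A (Python) =====
-- from collections import defaultdict
--
-- def solution(friends, gifts):
--     n = len(friends)
--     table = [[0]* n for _ in range(n)]
--     nums = [0] * n
--
--     # friends 이름 순서대로 딕셔너리에 저장
--     friend_dict = dict()
--     for i in range(n):
--         friend_dict[friends[i]] = i  #(이름, idx)
--     for gift in gifts:
--         a, b = gift.split(' ')  # 준 사람, 받은 사람
--         idx1, idx2 = friend_dict[a], friend_dict[b]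
--         table[idx1][idx2] += 1
--         nums[idx1] += 1  # 선물지수 업데이트
--         nums[idx2] -= 1
--
--     next_gift = defaultdict(int)
--     for friend in range(n):
--         for other in range(n):
--             if friend != other and table[friend][other] > table[other][friend]:
--                 next_gift[friend] += 1
--             elif friend != other and table[friend][other] == table[other][friend]:
--                 if nums[friend] > nums[other]:
--                     next_gift[friend] += 1
--     return max(next_gift.values(), default=0)
-- ===== SOURCE B (Python) =====
-- def solution(friends, gifts):
--     # Faster: no n x n table; sparse directed-pair counts, a sorted-rank base
--     # count for the "no gifts between them" ties, corrections only over pairs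
--     # that actually exchanged gifts.  O((n + g) log n) instead of O(n^2 + g).
--     n = len(friends)
--     idx = {name: i for i, name in enumerate(friends)}
--     score = [0] * n
--     cnt = {}
--     for gift in gifts:
--         a, b = gift.split(' ')
--         i, j = idx[a], idx[b]
--         cnt[(i, j)] = cnt.get((i, j), 0) + 1
--         score[i] += 1
--         score[j] -= 1
--     adj = {}
--     for (i, j) in cnt:
--         if i != j:
--             adj.setdefault(i, set()).add(j)
--             adj.setdefault(j, set()).add(i)
--     ranks = {}
--     for k, v in enumerate(sorted(score)):
--         if v not in ranks:
--             ranks[v] = k  # number of strictly smaller scores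
--     best = 0
--     for i in range(n):
--         pts = ranks[score[i]]
--         for j in adj.get(i, ()):
--             x = cnt.get((i, j), 0)
--             y = cnt.get((j, i), 0)
--             if x > y or (x == y and score[i] > score[j]):
--                 pts += 1
--             if score[j] < score[i]:
--                 pts -= 1
--         if pts > best:
--             best = pts
--     return best
-- ===== Notes on version B (the rewrite author's own statement) =====
-- stated objective: faster
-- what changed: Instead of building an n-by-n table and comparing every ordered pair of friends, B keeps a sparse dict of directed pair counts, computes each friend's base points as the number of strictly smaller gift indices via one sort plus a first-index rank dict, and corrects only over the pairs that actually exchanged gifts, taking a running max.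
import Mathlib
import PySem

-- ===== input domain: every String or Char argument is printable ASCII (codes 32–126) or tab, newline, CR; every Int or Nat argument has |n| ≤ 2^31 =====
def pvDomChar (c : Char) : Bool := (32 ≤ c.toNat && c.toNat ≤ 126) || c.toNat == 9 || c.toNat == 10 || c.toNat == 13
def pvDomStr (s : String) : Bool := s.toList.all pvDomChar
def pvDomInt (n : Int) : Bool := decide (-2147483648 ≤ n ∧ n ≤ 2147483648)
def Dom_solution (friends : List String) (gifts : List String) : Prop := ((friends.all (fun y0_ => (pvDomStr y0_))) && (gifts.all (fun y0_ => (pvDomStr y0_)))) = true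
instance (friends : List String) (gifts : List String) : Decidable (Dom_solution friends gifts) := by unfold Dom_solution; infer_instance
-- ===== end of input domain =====

-- B replaces A's O(n^2) all-pairs table scan by sparse directed-pair counts, a
-- sorted-rank base count for the all-zero ties, and corrections only on pairs
-- that actually exchanged gifts (objective: faster).

-- ===== PORT A =====
-- gift.split(' ') (the Pre_ below guarantees exactly two parts)
def pySplitSpace (g : String) : List String := (PySem.Str.split? g " ").getD []

-- table[i][j]
def tgetA (t : List (List Int)) (i j : Nat) : Int := (t.getD i []).getD j 0

-- the body of A's gift loop (state: (table, nums))
def giftStepA (fd : PySem.Dict String Nat) (st : List (List Int) × List Int)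
    (gift : String) : List (List Int) × List Int :=
  let parts := pySplitSpace gift
  let a := parts.getD 0 ""
  let b := parts.getD 1 ""
  let idx1 := (fd.get? a).getD 0
  let idx2 := (fd.get? b).getD 0
  (st.1.modify idx1 (fun row => row.modify idx2 (· + 1)),
   (st.2.modify idx1 (· + 1)).modify idx2 (· - 1))

-- the body of A's inner comparison loop (next_gift is a defaultdict(int))
def innerStepA (table : List (List Int)) (nums : List Int) (friend : Nat)
    (d : PySem.Dict Nat Int) (other : Nat) : PySem.Dict Nat Int :=
  if friend ≠ other ∧ tgetA table friend other > tgetA table other friend then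
    d.modify friend 0 (· + 1)
  else if friend ≠ other ∧ tgetA table friend other = tgetA table other friend then
    if nums.getD friend 0 > nums.getD other 0 then d.modify friend 0 (· + 1) else d
  else d

def solution (friends : List String) (gifts : List String) : Int :=
  let n := friends.length
  let fd : PySem.Dict String Nat :=
    (List.range n).foldl (fun d i => d.insert (friends.getD i "") i) PySem.Dict.empty
  let st := gifts.foldl (giftStepA fd)
    (List.replicate n (List.replicate n 0), List.replicate n 0)
  let ng : PySem.Dict Nat Int :=
    (List.range n).foldl (fun d friend =>
      (List.range n).foldl (innerStepA st.1 st.2 friend) d) PySem.Dict.empty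
  PySem.List.maxD ng.values (fun v => v) 0

-- ===== PORT B =====
-- the body of B's gift loop (state: (cnt, score))
def giftStepB (idx : PySem.Dict String Nat)
    (st : PySem.Dict (Nat × Nat) Int × List Int) (gift : String) :
    PySem.Dict (Nat × Nat) Int × List Int :=
  let parts := pySplitSpace gift
  let i := (idx.get? (parts.getD 0 "")).getD 0
  let j := (idx.get? (parts.getD 1 "")).getD 0
  (st.1.insert (i, j) (st.1.getD (i, j) 0 + 1),
   (st.2.modify i (· + 1)).modify j (· - 1))

-- adj.setdefault(i, set()).add(j); adj.setdefault(j, set()).add(i)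
def adjStepB (d : PySem.Dict Nat (PySem.Set Nat)) (p : Nat × Nat) :
    PySem.Dict Nat (PySem.Set Nat) :=
  if p.1 ≠ p.2 then
    (d.modify p.1 PySem.Set.empty (fun s => s.add p.2)).modify p.2 PySem.Set.empty
      (fun s => s.add p.1)
  else d

-- if v not in ranks: ranks[v] = k
def rankStepB (d : PySem.Dict Int Int) (p : Int × Nat) : PySem.Dict Int Int :=
  if d.contains p.1 then d else d.insert p.1 (p.2 : Int)

-- the body of B's correction loop over gift partners
def ptsStepB (cnt : PySem.Dict (Nat × Nat) Int) (score : List Int) (i : Nat)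
    (pts : Int) (j : Nat) : Int :=
  let x := cnt.getD (i, j) 0
  let y := cnt.getD (j, i) 0
  let pts := if x > y ∨ (x = y ∧ score.getD i 0 > score.getD j 0) then pts + 1 else pts
  if score.getD j 0 < score.getD i 0 then pts - 1 else pts

def solution_alt (friends : List String) (gifts : List String) : Int :=
  let n := friends.length
  let idx : PySem.Dict String Nat :=
    friends.zipIdx.foldl (fun d p => d.insert p.1 p.2) PySem.Dict.empty
  let st := gifts.foldl (giftStepB idx) (PySem.Dict.empty, List.replicate n 0)
  let cnt := st.1
  let score := st.2
  let adj := cnt.keys.foldl adjStepB PySem.Dict.empty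
  let ranks := (PySem.List.sorted score (fun v => v) false).zipIdx.foldl rankStepB
    PySem.Dict.empty
  (List.range n).foldl (fun best i =>
    let pts := (adj.getD i PySem.Set.empty).foldl (ptsStepB cnt score i)
      ((ranks.get? (score.getD i 0)).getD 0)
    if pts > best then pts else best) 0

-- ===== PRECONDITION & SPEC =====
-- Pre_ admits exactly the inputs on which A returns: every gift splits on a
-- single space into exactly two parts and both names occur in friends
-- (otherwise A raises ValueError or KeyError).
def Pre_solution (friends : List String) (gifts : List String) : Prop :=
  ∀ g ∈ gifts, ((PySem.Str.split? g " ").getD []).length = 2 ∧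
    ((PySem.Str.split? g " ").getD []).getD 0 "" ∈ friends ∧
    ((PySem.Str.split? g " ").getD []).getD 1 "" ∈ friends
instance (friends : List String) (gifts : List String) : Decidable (Pre_solution friends gifts) := by
  unfold Pre_solution; infer_instance

def pvWitness_solution : List String × List String :=
  (["muzi", "ryan", "frodo"], ["muzi ryan", "ryan frodo", "muzi frodo", "ryan muzi"])

def Spec_solution (friends : List String) (gifts : List String) (out : Int) : Prop :=
  out = solution_alt friends gifts
instance (friends : List String) (gifts : List String) (out : Int) : Decidable (Spec_solution friends gifts out) := by
  unfold Spec_solution; infer_instance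

-- ===== CLAIM (what is proved, stated in full; the proofs are below) =====
def Claim_equal_solution : Prop := ∀ (friends : List String) (gifts : List String), Dom_solution friends gifts → Pre_solution friends gifts → Spec_solution friends gifts (solution friends gifts)

-- ===== LEMMAS AND PROOFS =====


lemma idxDict_eq (xs : List String) (e : PySem.Dict String Nat) :
    xs.zipIdx.foldl (fun d p => d.insert p.1 p.2) e
      = (List.range xs.length).foldl (fun d i => d.insert (xs.getD i "") i) e := by
  induction xs using List.reverseRecOn generalizing e with
  | nil => rfl
  | append_singleton xs x ih =>
    rw [List.zipIdx_append, List.foldl_append, ih, List.length_append,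
      List.length_singleton, List.range_succ, List.foldl_append]
    simp only [List.zipIdx_cons, List.zipIdx_nil, List.foldl_cons, List.foldl_nil]
    congr 1
    · apply PySem.List.foldl_congr_mem'
      intro i hi d
      have hlt : i < xs.length := List.mem_range.mp hi
      congr 1
      rw [List.getD_eq_getElem?_getD, List.getD_eq_getElem?_getD,
        List.getElem?_append_left hlt]
    · rw [List.getD_eq_getElem?_getD]
      simp
    · omega

lemma fd_val_mem (xs : List String) : ∀ (l : List Nat) (d : PySem.Dict String Nat) a v,
    (l.foldl (fun d i => d.insert (xs.getD i "") i) d).get? a = some v →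
    v ∈ l ∨ d.get? a = some v := by
  intro l
  induction l with
  | nil => intro d a v h; exact Or.inr h
  | cons i t ih =>
    intro d a v h
    rcases ih _ a v h with hm | hm
    · exact Or.inl (List.mem_cons_of_mem _ hm)
    · rw [PySem.Dict.get?_insert] at hm
      by_cases hax : a = xs.getD i ""
      · rw [if_pos hax] at hm
        obtain rfl := Option.some.inj hm
        exact Or.inl List.mem_cons_self
      · rw [if_neg hax] at hm
        exact Or.inr hm

lemma fd_contains_aux (xs : List String) : ∀ (l : List Nat) (d : PySem.Dict String Nat) a,
    ((d.get? a).isSome ∨ ∃ i ∈ l, xs.getD i "" = a) →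
    ((l.foldl (fun d i => d.insert (xs.getD i "") i) d).get? a).isSome := by
  intro l
  induction l with
  | nil =>
    intro d a h
    rcases h with h | ⟨i, hi, _⟩
    · exact h
    · cases hi
  | cons i t ih =>
    intro d a h
    apply ih
    rcases h with h | ⟨j, hj, hja⟩
    · left
      rw [PySem.Dict.get?_insert]
      split
      · simp
      · exact h
    · rcases List.mem_cons.mp hj with rfl | hjt
      · left
        rw [PySem.Dict.get?_insert, if_pos hja.symm]
        simp
      · right; exact ⟨j, hjt, hja⟩

lemma fd_spec (xs : List String) (a : String) (ha : a ∈ xs) :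
    ∃ v, ((List.range xs.length).foldl (fun d i => d.insert (xs.getD i "") i)
      PySem.Dict.empty).get? a = some v ∧ v < xs.length := by
  obtain ⟨k, hk, hka⟩ := List.getElem_of_mem ha
  have hsome := fd_contains_aux xs (List.range xs.length) PySem.Dict.empty a
    (Or.inr ⟨k, List.mem_range.mpr hk, by
      rw [List.getD_eq_getElem?_getD, List.getElem?_eq_getElem hk]; exact hka⟩)
  obtain ⟨v, hv⟩ := Option.isSome_iff_exists.mp hsome
  refine ⟨v, hv, ?_⟩
  rcases fd_val_mem xs (List.range xs.length) PySem.Dict.empty a v hv with hm | hm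
  · exact List.mem_range.mp hm
  · rw [PySem.Dict.get?_empty] at hm; cases hm

lemma modify_fold (f : Nat) : ∀ (l : List Nat) (d : PySem.Dict Nat Int),
    l.foldl (fun d (_ : Nat) => d.modify f 0 (· + 1)) d
      = if l = [] then d else d.modify f 0 (· + (l.length : Int)) := by
  intro l
  induction l with
  | nil => intro d; simp
  | cons i t ih =>
    intro d
    rw [List.foldl_cons, ih]
    by_cases ht : t = []
    · subst ht; simp
    · rw [if_neg ht, if_neg (by simp)]
      simp only [PySem.Dict.modify, PySem.Dict.insert_insert_self,
        PySem.Dict.getD_insert_self]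
      congr 1
      simp only [List.length_cons]
      push_cast
      ring

lemma maxD_append_singleton (V : List Int) (x : Int) :
    PySem.List.maxD (V ++ [x]) (fun v => v) 0
      = if V = [] then x else max (PySem.List.maxD V (fun v => v) 0) x := by
  cases V with
  | nil =>
    simp [PySem.List.maxD, PySem.List.max?_id_cons]
  | cons v t =>
    rw [if_neg (by simp)]
    simp only [PySem.List.maxD, List.cons_append, PySem.List.max?_id_cons,
      List.foldl_append, List.foldl_cons, List.foldl_nil, Option.getD_some]

lemma countP_eq_countP_range (l : List Int) (p : Int → Bool) :
    l.countP p = (List.range l.length).countP (fun j => p (l.getD j 0)) := by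
  induction l using List.reverseRecOn with
  | nil => rfl
  | append_singleton l x ih =>
    rw [List.countP_append, List.length_append, List.length_singleton,
      List.range_succ, List.countP_append, ih]
    congr 1
    · apply List.countP_congr
      intro j hj
      have hlt : j < l.length := List.mem_range.mp hj
      rw [List.getD_eq_getElem?_getD, List.getD_eq_getElem?_getD,
        List.getElem?_append_left hlt]
    · simp [List.getD_eq_getElem?_getD]

lemma sum_map_eq_of_vanish (h : Nat → Int) (l l' : List Nat) (hl : l.Nodup)
    (hl' : l'.Nodup) (hsub : ∀ j ∈ l', j ∈ l) (hz : ∀ j ∈ l, j ∉ l' → h j = 0) :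
    (l.map h).sum = (l'.map h).sum := by
  have step1 : ∀ (t : List Nat), (∀ j ∈ t, j ∉ l' → h j = 0) →
      (t.map h).sum = ((t.filter (fun j => decide (j ∈ l'))).map h).sum := by
    intro t
    induction t with
    | nil => intro _; rfl
    | cons a t iht =>
      intro hzt
      rw [List.map_cons, List.sum_cons, List.filter_cons]
      by_cases hal : a ∈ l'
      · rw [if_pos (by simpa using hal), List.map_cons, List.sum_cons,
          iht (fun j hj => hzt j (List.mem_cons_of_mem _ hj))]
      · rw [if_neg (by simpa using hal), hzt a List.mem_cons_self hal, zero_add,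
          iht (fun j hj => hzt j (List.mem_cons_of_mem _ hj))]
  rw [step1 l hz]
  have hperm : (l.filter (fun j => decide (j ∈ l'))).Perm l' := by
    rw [List.perm_ext_iff_of_nodup (hl.filter _) hl']
    intro a
    simp only [List.mem_filter, decide_eq_true_eq]
    exact ⟨fun ha => ha.2, fun ha => ⟨hsub a ha, ha⟩⟩
  exact (hperm.map h).sum_eq

def GInv (n : Nat) (stA : List (List Int) × List Int)
    (stB : PySem.Dict (Nat × Nat) Int × List Int) : Prop :=
  stA.2 = stB.2 ∧ stA.2.length = n ∧ stA.1.length = n ∧ (∀ r ∈ stA.1, r.length = n) ∧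
  (∀ i j, tgetA stA.1 i j = stB.1.getD (i, j) 0) ∧
  (∀ p ∈ stB.1.keys, p.1 < n ∧ p.2 < n)


lemma getD_modify_list {α : Type} (l : List α) (i k : Nat) (f : α → α) (d : α) :
    (l.modify i f).getD k d = if i = k ∧ k < l.length then f (l.getD k d) else l.getD k d := by
  by_cases hk : k < l.length
  · rw [List.getD_eq_getElem?_getD (l := l.modify i f) (i := k) (a := d),
      List.getElem?_modify, List.getElem?_eq_getElem hk]
    by_cases hik : i = k
    · rw [if_pos ⟨hik, hk⟩]
      simp only [Option.map_eq_map, Option.map_some, Option.getD_some, if_pos hik]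
      rw [List.getD_eq_getElem?_getD (l := l) (i := k) (a := d),
        List.getElem?_eq_getElem hk, Option.getD_some]
    · rw [if_neg (fun hh => hik hh.1)]
      simp only [Option.map_eq_map, Option.map_some, Option.getD_some, if_neg hik]
      rw [List.getD_eq_getElem?_getD (l := l) (i := k) (a := d),
        List.getElem?_eq_getElem hk, Option.getD_some]
  · have hnone : l[k]? = none := List.getElem?_eq_none (by omega)
    rw [if_neg (fun hh => hk hh.2),
      List.getD_eq_getElem?_getD (l := l.modify i f) (i := k) (a := d),
      List.getElem?_modify, hnone,
      List.getD_eq_getElem?_getD (l := l) (i := k) (a := d), hnone]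
    rfl

lemma tget_modify (T : List (List Int)) (v1 v2 : Nat) (h1 : v1 < T.length)
    (h2 : v2 < (T.getD v1 []).length) :
    ∀ i j, tgetA (T.modify v1 (fun row => row.modify v2 (· + 1))) i j
      = tgetA T i j + (if i = v1 ∧ j = v2 then 1 else 0) := by
  intro i j
  simp only [tgetA]
  rw [getD_modify_list T v1 i (fun row => row.modify v2 (· + 1)) []]
  by_cases hi : v1 = i ∧ i < T.length
  · obtain ⟨rfl, hlt⟩ := hi
    rw [if_pos ⟨rfl, hlt⟩, getD_modify_list (T.getD v1 []) v2 j (· + 1) 0]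
    by_cases hj : v2 = j ∧ j < (T.getD v1 []).length
    · obtain ⟨rfl, hjlt⟩ := hj
      rw [if_pos ⟨rfl, hjlt⟩, if_pos ⟨rfl, rfl⟩]
    · rw [if_neg hj, if_neg (fun hh : v1 = v1 ∧ j = v2 =>
        hj ⟨hh.2.symm, by rw [hh.2]; exact h2⟩), add_zero]
  · rw [if_neg hi, if_neg (fun hh : i = v1 ∧ j = v2 =>
      hi ⟨hh.1.symm, by rw [hh.1]; exact h1⟩), add_zero]

lemma gift_inv (friends : List String) (fd : PySem.Dict String Nat) (n : Nat)
    (hfd : ∀ a ∈ friends, ∃ v, fd.get? a = some v ∧ v < n) :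
    ∀ (gs : List String) stA stB,
    (∀ g ∈ gs, (pySplitSpace g).length = 2 ∧ (pySplitSpace g).getD 0 "" ∈ friends ∧
      (pySplitSpace g).getD 1 "" ∈ friends) →
    GInv n stA stB →
    GInv n (gs.foldl (giftStepA fd) stA) (gs.foldl (giftStepB fd) stB) := by
  intro gs
  induction gs with
  | nil => intro stA stB _ h; exact h
  | cons g t ih =>
    intro stA stB hpre hinv
    rw [List.foldl_cons, List.foldl_cons]
    apply ih _ _ (fun g' hg' => hpre g' (List.mem_cons_of_mem _ hg'))
    obtain ⟨hNS, hNlen, hTlen, hrows, hrel, hkeys⟩ := hinv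
    obtain ⟨hg2, hga, hgb⟩ := hpre g List.mem_cons_self
    obtain ⟨v1, hv1, hv1n⟩ := hfd _ hga
    obtain ⟨v2, hv2, hv2n⟩ := hfd _ hgb
    simp only [giftStepA, giftStepB, hv1, hv2, Option.getD_some]
    have hv2' : v2 < (stA.1.getD v1 []).length := by
      rw [List.getD_eq_getElem?_getD, List.getElem?_eq_getElem (by omega : v1 < stA.1.length),
        Option.getD_some]
      rw [hrows stA.1[v1] (List.getElem_mem _)]
      exact hv2n
    refine ⟨by rw [hNS], ?_, ?_, ?_, ?_, ?_⟩
    · simpa using hNlen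
    · simpa using hTlen
    · intro r hr
      obtain ⟨k, hk, hrk⟩ := List.getElem_of_mem hr
      have h1 : (stA.1.modify v1 (fun row => row.modify v2 (· + 1)))[k]? = some r := by
        rw [List.getElem?_eq_getElem hk]
        exact congrArg some hrk
      rw [List.getElem?_modify] at h1
      cases hTk : stA.1[k]? with
      | none => rw [hTk] at h1; cases h1
      | some row =>
        rw [hTk] at h1
        simp only [Option.map_eq_map, Option.map_some] at h1
        obtain rfl := Option.some.inj h1
        have hrowlen := hrows row (List.mem_of_getElem? hTk)
        split_ifs
        · rw [List.length_modify]; exact hrowlen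
        · exact hrowlen
    · intro i j
      rw [tget_modify stA.1 v1 v2 (by omega) hv2' i j, hrel i j,
        PySem.Dict.getD_insert]
      by_cases hij : i = v1 ∧ j = v2
      · obtain ⟨rfl, rfl⟩ := hij
        rw [if_pos ⟨rfl, rfl⟩, if_pos rfl]
      · rw [if_neg hij, if_neg (fun he : (i, j) = (v1, v2) => by
          injection he with a b; exact hij ⟨a, b⟩), add_zero]
    · intro p hp
      rcases (PySem.Dict.mem_keys_insert _ _ _ _).mp hp with rfl | hpold
      · exact ⟨hv1n, hv2n⟩
      · exact hkeys p hpold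

def condA (table : List (List Int)) (nums : List Int) (f o : Nat) : Bool :=
  decide (f ≠ o) && (decide (tgetA table f o > tgetA table o f) ||
    (decide (tgetA table f o = tgetA table o f) && decide (nums.getD f 0 > nums.getD o 0)))
def cA (table : List (List Int)) (nums : List Int) (n f : Nat) : Int :=
  ((List.range n).countP (fun o => condA table nums f o) : Nat)

lemma innerA_fold (table : List (List Int)) (nums : List Int) (n f : Nat)
    (d : PySem.Dict Nat Int) :
    (List.range n).foldl (innerStepA table nums f) d
      = if 0 < cA table nums n f then d.modify f 0 (· + cA table nums n f) else d := by
  have hstep : ∀ o ∈ List.range n, ∀ d' : PySem.Dict Nat Int,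
      innerStepA table nums f d' o
        = if condA table nums f o then d'.modify f 0 (· + 1) else d' := by
    intro o _ d'
    simp only [innerStepA, condA]
    by_cases h1 : f = o
    · simp [h1]
    · by_cases h2 : tgetA table f o > tgetA table o f
      · simp [h1, h2]
      · by_cases h3 : tgetA table f o = tgetA table o f
        · by_cases h4 : nums.getD f 0 > nums.getD o 0 <;>
            simp [h1, h2, h3, h4]
        · simp [h1, h2, h3]
  rw [PySem.List.foldl_congr_mem' _ _ _ d hstep,
    PySem.List.foldl_if_eq_foldl_filter (p := fun o => condA table nums f o),
    modify_fold]
  have hlen : cA table nums n f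
      = (((List.range n).filter (fun o => condA table nums f o)).length : Int) := by
    rw [cA, List.countP_eq_length_filter]
  by_cases hnil : (List.range n).filter (fun o => condA table nums f o) = []
  · rw [if_pos hnil, if_neg (by rw [hlen, hnil]; simp)]
  · rw [if_neg hnil, if_pos (by
      rw [hlen]
      have := List.length_pos_of_ne_nil hnil
      omega), ← hlen]


lemma outer_items (table : List (List Int)) (nums : List Int) (n : Nat) : ∀ (m : Nat),
    ((List.range m).foldl (fun d friend =>
        (List.range n).foldl (innerStepA table nums friend) d) PySem.Dict.empty).items
      = (List.range m).filterMap (fun f =>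
          if 0 < cA table nums n f then some (f, cA table nums n f) else none) := by
  intro m
  induction m with
  | zero => rfl
  | succ m ih =>
    rw [List.range_succ, List.foldl_append, List.filterMap_append, List.foldl_cons,
      List.foldl_nil, innerA_fold]
    set dm := (List.range m).foldl (fun d friend =>
      (List.range n).foldl (innerStepA table nums friend) d) PySem.Dict.empty with hdm
    have hmem : m ∉ dm.keys := by
      intro hmm
      have hkk : dm.keys = dm.items.map Prod.fst := rfl
      rw [hkk, ih] at hmm
      obtain ⟨p, hp, hp1⟩ := List.mem_map.mp hmm
      obtain ⟨ff, hff, hpf⟩ := List.mem_filterMap.mp hp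
      by_cases hc : 0 < cA table nums n ff
      · rw [if_pos hc] at hpf
        obtain rfl := Option.some.inj hpf
        have := List.mem_range.mp hff
        simp at hp1
        omega
      · rw [if_neg hc] at hpf; cases hpf
    have hcont : dm.contains m = false := by
      cases hc : dm.contains m
      · rfl
      · exact absurd ((PySem.Dict.contains_iff_mem_keys _ _).mp hc) hmem
    by_cases h : 0 < cA table nums n m
    · have hfm : List.filterMap (fun f =>
          if 0 < cA table nums n f then some (f, cA table nums n f) else none) [m]
          = [(m, cA table nums n m)] := by simp [h]
      rw [if_pos h, hfm]
      simp only [PySem.Dict.modify]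
      rw [PySem.Dict.getD_of_not_contains _ _ hcont,
        PySem.Dict.items_insert_of_not_contains _ _ hcont, ih, zero_add]
    · have hfm : List.filterMap (fun f =>
          if 0 < cA table nums n f then some (f, cA table nums n f) else none) [m]
          = [] := by simp [h]
      rw [if_neg h, hfm, ih, List.append_nil]

lemma maxD_filterMap (c : Nat → Int) (hc : ∀ i, 0 ≤ c i) : ∀ (m : Nat),
    PySem.List.maxD ((List.range m).filterMap
        (fun i => if 0 < c i then some (c i) else none)) (fun v => v) 0
      = (List.range m).foldl (fun b i => if c i > b then c i else b) 0 := by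
  suffices H : ∀ m, PySem.List.maxD ((List.range m).filterMap
        (fun i => if 0 < c i then some (c i) else none)) (fun v => v) 0
      = (List.range m).foldl (fun b i => if c i > b then c i else b) 0 ∧
      0 ≤ (List.range m).foldl (fun b i => if c i > b then c i else b) 0 ∧
      ((List.range m).filterMap (fun i => if 0 < c i then some (c i) else none) = [] →
        (List.range m).foldl (fun b i => if c i > b then c i else b) 0 = 0) from
    fun m => (H m).1
  intro m
  induction m with
  | zero => exact ⟨rfl, le_refl 0, fun _ => rfl⟩
  | succ m ih =>
    obtain ⟨ih1, ih2, ih3⟩ := ih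
    rw [List.range_succ, List.filterMap_append, List.foldl_append, List.foldl_cons,
      List.foldl_nil]
    by_cases h : 0 < c m
    · have hfm : List.filterMap (fun i => if 0 < c i then some (c i) else none) [m]
          = [c m] := by simp [h]
      rw [hfm, maxD_append_singleton]
      by_cases hV : (List.range m).filterMap
          (fun i => if 0 < c i then some (c i) else none) = []
      · rw [if_pos hV, ih3 hV]
        refine ⟨by rw [if_pos h], by omega, fun hh => absurd hh (by simp)⟩
      · rw [if_neg hV, ih1]
        refine ⟨by omega, by omega, fun hh => absurd hh (by simp)⟩
    · have hfm : List.filterMap (fun i => if 0 < c i then some (c i) else none) [m]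
          = [] := by simp [h]
      rw [hfm, List.append_nil]
      have hcm : c m = 0 := le_antisymm (by omega) (hc m)
      refine ⟨by rw [ih1]; omega, by omega, fun hh => by rw [ih3 hh]; omega⟩

lemma adj_fold : ∀ (ks : List (Nat × Nat)) (d : PySem.Dict Nat (PySem.Set Nat)),
    (∀ x, ((d.getD x PySem.Set.empty) : List Nat).Nodup) →
    ∀ x, (((ks.foldl adjStepB d).getD x PySem.Set.empty : List Nat).Nodup ∧
      ∀ y, (y ∈ ((ks.foldl adjStepB d).getD x PySem.Set.empty : List Nat) ↔
        y ∈ (d.getD x PySem.Set.empty : List Nat) ∨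
          (x ≠ y ∧ ((x, y) ∈ ks ∨ (y, x) ∈ ks)))) := by
  intro ks
  induction ks with
  | nil =>
    intro d hd x
    exact ⟨hd x, by simp⟩
  | cons p t ih =>
    obtain ⟨i, j⟩ := p
    intro d hd x
    rw [List.foldl_cons]
    by_cases hij : i = j
    · subst hij
      have hstep : adjStepB d (i, i) = d := by simp [adjStepB]
      rw [hstep]
      refine ⟨(ih d hd x).1, fun y => ?_⟩
      rw [(ih d hd x).2 y]
      simp only [List.mem_cons, Prod.mk.injEq]
      constructor
      · rintro (hm | ⟨hxy, hmem | hmem⟩)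
        · exact Or.inl hm
        · exact Or.inr ⟨hxy, Or.inl (Or.inr hmem)⟩
        · exact Or.inr ⟨hxy, Or.inr (Or.inr hmem)⟩
      · rintro (hm | ⟨hxy, (⟨hx, hy⟩ | hmem) | (⟨hy, hx⟩ | hmem)⟩)
        · exact Or.inl hm
        · exact absurd (hx.trans hy.symm) hxy
        · exact Or.inr ⟨hxy, Or.inl hmem⟩
        · exact absurd (hx.trans hy.symm) hxy
        · exact Or.inr ⟨hxy, Or.inr hmem⟩
    · have hstep : adjStepB d (i, j)
          = (d.modify i PySem.Set.empty (fun s => s.add j)).modify j PySem.Set.empty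
              (fun s => s.add i) := by simp [adjStepB, hij]
      rw [hstep]
      set d' := (d.modify i PySem.Set.empty (fun s => s.add j)).modify j
        PySem.Set.empty (fun s => s.add i) with hd'def
      have hgetD : ∀ z, d'.getD z PySem.Set.empty
          = if z = j then (d.getD j PySem.Set.empty).add i
            else if z = i then (d.getD i PySem.Set.empty).add j
            else d.getD z PySem.Set.empty := by
        intro z
        rw [hd'def, PySem.Dict.getD_modify]
        by_cases hzj : z = j
        · rw [if_pos hzj, if_pos hzj, PySem.Dict.getD_modify,
            if_neg (fun hji => hij hji.symm)]
        · rw [if_neg hzj, if_neg hzj, PySem.Dict.getD_modify]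
      have hd' : ∀ z, ((d'.getD z PySem.Set.empty : List Nat)).Nodup := by
        intro z
        rw [hgetD z]
        split_ifs
        · exact PySem.Set.nodup_add _ _ (hd j)
        · exact PySem.Set.nodup_add _ _ (hd i)
        · exact hd z
      refine ⟨(ih d' hd' x).1, fun y => ?_⟩
      rw [(ih d' hd' x).2 y, hgetD x]
      have hmm : y ∈ ((if x = j then (d.getD j PySem.Set.empty).add i
            else if x = i then (d.getD i PySem.Set.empty).add j
            else d.getD x PySem.Set.empty) : List Nat)
          ↔ y ∈ (d.getD x PySem.Set.empty : List Nat) ∨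
            (x = i ∧ y = j) ∨ (x = j ∧ y = i) := by
        by_cases hxj : x = j
        · subst hxj
          rw [if_pos rfl, PySem.Set.mem_add]
          constructor
          · rintro (hm | rfl)
            · exact Or.inl hm
            · exact Or.inr (Or.inr ⟨rfl, rfl⟩)
          · rintro (hm | ⟨hx, hy⟩ | ⟨_, hy⟩)
            · exact Or.inl hm
            · exact absurd hx.symm hij
            · exact Or.inr hy
        · rw [if_neg hxj]
          by_cases hxi : x = i
          · subst hxi
            rw [if_pos rfl, PySem.Set.mem_add]
            constructor
            · rintro (hm | rfl)
              · exact Or.inl hm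
              · exact Or.inr (Or.inl ⟨rfl, rfl⟩)
            · rintro (hm | ⟨_, hy⟩ | ⟨hx, hy⟩)
              · exact Or.inl hm
              · exact Or.inr hy
              · exact absurd hx hxj
          · rw [if_neg hxi]
            constructor
            · exact fun hm => Or.inl hm
            · rintro (hm | ⟨hx, _⟩ | ⟨hx, _⟩)
              · exact hm
              · exact absurd hx hxi
              · exact absurd hx hxj
      rw [hmm]
      simp only [List.mem_cons, Prod.mk.injEq]
      constructor
      · rintro ((hm | ⟨hx, hy⟩ | ⟨hx, hy⟩) | ⟨hxy, hmem | hmem⟩)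
        · exact Or.inl hm
        · subst hx; subst hy
          exact Or.inr ⟨hij, Or.inl (Or.inl ⟨rfl, rfl⟩)⟩
        · subst hx; subst hy
          exact Or.inr ⟨fun he => hij he.symm, Or.inr (Or.inl ⟨rfl, rfl⟩)⟩
        · exact Or.inr ⟨hxy, Or.inl (Or.inr hmem)⟩
        · exact Or.inr ⟨hxy, Or.inr (Or.inr hmem)⟩
      · rintro (hm | ⟨hxy, (⟨hx, hy⟩ | hmem) | (⟨hy, hx⟩ | hmem)⟩)
        · exact Or.inl (Or.inl hm)
        · exact Or.inl (Or.inr (Or.inl ⟨hx, hy⟩))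
        · exact Or.inr ⟨hxy, Or.inl hmem⟩
        · exact Or.inl (Or.inr (Or.inr ⟨hx, hy⟩))
        · exact Or.inr ⟨hxy, Or.inr hmem⟩

lemma rank_fold (xs : List Int) : ∀ (k0 : Nat) (d : PySem.Dict Int Int) (v : Int),
    ((xs.zipIdx k0).foldl rankStepB d).get? v
      = if d.contains v = true then d.get? v
        else (PySem.List.index? xs v).map (fun t => ((k0 + t : Nat) : Int)) := by
  induction xs with
  | nil =>
    intro k0 d v
    by_cases hc : d.contains v = true
    · simp [hc]
    · simp only [List.zipIdx_nil, List.foldl_nil, if_neg hc]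
      rw [(PySem.Dict.get?_eq_none_iff_contains _ _).mpr (by simpa using hc)]
      rfl
  | cons x xs ih =>
    intro k0 d v
    rw [List.zipIdx_cons, List.foldl_cons]
    show ((xs.zipIdx (k0+1)).foldl rankStepB (rankStepB d (x, k0))).get? v = _
    by_cases hdx : d.contains x = true
    · have hstep : rankStepB d (x, k0) = d := by simp [rankStepB, hdx]
      rw [hstep, ih]
      by_cases hv : d.contains v = true
      · rw [if_pos hv, if_pos hv]
      · rw [if_neg hv, if_neg hv]
        have hxv : x ≠ v := by
          intro he; rw [he] at hdx; exact absurd hdx (by simp [hv])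
        rw [PySem.List.index?_cons_of_ne _ hxv]
        cases hidx : PySem.List.index? xs v with
        | none => simp
        | some t => simp only [Option.map_some]; congr 1; omega
    · have hstep : rankStepB d (x, k0) = d.insert x (k0 : Int) := by
        simp [rankStepB, hdx]
      rw [hstep, ih]
      by_cases hxv : v = x
      · subst hxv
        rw [if_pos (by rw [PySem.Dict.contains_insert]; simp),
          PySem.Dict.get?_insert_self, if_neg hdx, PySem.List.index?_cons_self]
        simp
      · have hcontains : (d.insert x (k0 : Int)).contains v = d.contains v := by
          rw [PySem.Dict.contains_insert]
          simp [hxv]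
        rw [hcontains, PySem.Dict.get?_insert_of_ne _ _ hxv]
        by_cases hv : d.contains v = true
        · rw [if_pos hv, if_pos hv]
        · rw [if_neg hv, if_neg hv, PySem.List.index?_cons_of_ne _ (Ne.symm hxv)]
          cases hidx : PySem.List.index? xs v with
          | none => simp
          | some t => simp only [Option.map_some]; congr 1; omega

lemma index_sorted_eq_countP (xs : List Int) (v : Int) (k : Nat)
    (h : PySem.List.index? (PySem.List.sorted xs (fun x => x) false) v = some k) :
    k = xs.countP (fun w => decide (w < v)) := by
  have hperm := PySem.List.sorted_perm xs (fun x => x) false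
  have hpw : (PySem.List.sorted xs (fun x => x) false).Pairwise (fun a b => a ≤ b) :=
    PySem.List.sorted_pairwise xs (fun x => x)
  obtain ⟨pre, suf, hss, hlen, hvpre⟩ := (PySem.List.index?_eq_some_iff _ _ _).mp h
  rw [← hperm.countP_eq, hss, List.countP_append]
  rw [hss, List.pairwise_append] at hpw
  obtain ⟨hpre, hvs, hcross⟩ := hpw
  have h1 : pre.countP (fun w => decide (w < v)) = pre.length :=
    List.countP_eq_length.mpr (fun a ha => by
      have hle : a ≤ v := hcross a ha v List.mem_cons_self
      have hne : a ≠ v := fun he => hvpre (he ▸ ha)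
      simpa using lt_of_le_of_ne hle hne)
  have h2 : (v :: suf).countP (fun w => decide (w < v)) = 0 :=
    List.countP_eq_zero.mpr (fun a ha => by
      rcases List.mem_cons.mp ha with rfl | hsu
      · simp
      · have := (List.pairwise_cons.mp hvs).1 a hsu
        simp; omega)
  omega

lemma point_eq (n : Nat) (T : List (List Int)) (N : List Int)
    (C : PySem.Dict (Nat × Nat) Int)
    (hNlen : N.length = n)
    (hrel : ∀ a b, tgetA T a b = C.getD (a, b) 0)
    (hkeys : ∀ p ∈ C.keys, p.1 < n ∧ p.2 < n)
    (i : Nat) (hi : i < n) :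
    ((C.keys.foldl adjStepB PySem.Dict.empty).getD i PySem.Set.empty).foldl
        (ptsStepB C N i)
        ((((PySem.List.sorted N (fun v => v) false).zipIdx.foldl rankStepB
            PySem.Dict.empty).get? (N.getD i 0)).getD 0)
      = cA T N n i := by
  have hvmem : N.getD i 0 ∈ N := by
    rw [List.getD_eq_getElem?_getD (l := N) (i := i) (a := 0),
      List.getElem?_eq_getElem (by omega), Option.getD_some]
    exact List.getElem_mem _
  have hvss : N.getD i 0 ∈ PySem.List.sorted N (fun v => v) false :=
    (PySem.List.mem_sorted _ _ _ _).mpr hvmem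
  obtain ⟨t, ht⟩ := Option.isSome_iff_exists.mp
    ((PySem.List.index?_isSome_iff _ _).mpr hvss)
  have htc := index_sorted_eq_countP N (N.getD i 0) t ht
  have hrank : (((PySem.List.sorted N (fun v => v) false).zipIdx.foldl rankStepB
      PySem.Dict.empty).get? (N.getD i 0)).getD 0
      = ((N.countP (fun w => decide (w < N.getD i 0)) : Nat) : Int) := by
    rw [rank_fold _ 0 _ _, if_neg (by simp [PySem.Dict.contains_empty]), ht]
    simp [htc]
  have hadj := adj_fold C.keys PySem.Dict.empty (fun x => by
    rw [PySem.Dict.getD_empty]; exact List.nodup_nil)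
  set adjI := (C.keys.foldl adjStepB PySem.Dict.empty).getD i PySem.Set.empty
    with hadjI
  have hadjmem : ∀ y, y ∈ (adjI : List Nat)
      ↔ i ≠ y ∧ ((i, y) ∈ C.keys ∨ (y, i) ∈ C.keys) := by
    intro y
    rw [hadjI, (hadj i).2 y, PySem.Dict.getD_empty]
    simp [PySem.Set.empty]
  have hadjnodup : (adjI : List Nat).Nodup := (hadj i).1
  have hadjsub : ∀ j ∈ (adjI : List Nat), j ∈ List.range n := by
    intro j hj
    rcases (hadjmem j).mp hj with ⟨hij, hmm | hmm⟩
    · exact List.mem_range.mpr (hkeys _ hmm).2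
    · exact List.mem_range.mpr (hkeys _ hmm).1
  have hstep : ∀ j ∈ (adjI : List Nat), ∀ pts : Int,
      ptsStepB C N i pts j
        = pts + ((if C.getD (i, j) 0 > C.getD (j, i) 0 ∨
              (C.getD (i, j) 0 = C.getD (j, i) 0 ∧ N.getD i 0 > N.getD j 0)
            then (1 : Int) else 0)
          + (if N.getD j 0 < N.getD i 0 then (-1 : Int) else 0)) := by
    intro j _ pts
    simp only [ptsStepB]
    split_ifs <;> ring
  rw [PySem.List.foldl_congr_mem' _ _ _ _ hstep, PySem.List.foldl_add, hrank]
  have hcA : cA T N n i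
      = ((List.range n).map (fun o => if condA T N i o = true then (1:Int) else 0)).sum := by
    rw [cA, PySem.List.sum_map_ite_one_zero (fun o => condA T N i o) (List.range n)]
  have hbase : ((N.countP (fun w => decide (w < N.getD i 0)) : Nat) : Int)
      = ((List.range n).map (fun o =>
          if (decide (N.getD o 0 < N.getD i 0)) = true then (1:Int) else 0)).sum := by
    rw [PySem.List.sum_map_ite_one_zero (fun o => decide (N.getD o 0 < N.getD i 0))
      (List.range n), countP_eq_countP_range N (fun w => decide (w < N.getD i 0)), hNlen]
  have hsum : ((List.range n).map (fun o => if condA T N i o = true then (1:Int) else 0)).sum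
      = ((List.range n).map (fun o =>
          if (decide (N.getD o 0 < N.getD i 0)) = true then (1:Int) else 0)).sum
        + ((List.range n).map (fun o =>
            (if condA T N i o = true then (1:Int) else 0)
              - (if (decide (N.getD o 0 < N.getD i 0)) = true then (1:Int) else 0))).sum := by
    rw [← PySem.List.sum_map_add_int]
    exact congrArg List.sum (List.map_congr_left (fun o _ => by ring))
  have hvan : ((List.range n).map (fun o =>
        (if condA T N i o = true then (1:Int) else 0)
          - (if (decide (N.getD o 0 < N.getD i 0)) = true then (1:Int) else 0))).sum
      = (((adjI : List Nat)).map (fun o =>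
          (if condA T N i o = true then (1:Int) else 0)
            - (if (decide (N.getD o 0 < N.getD i 0)) = true then (1:Int) else 0))).sum := by
    apply sum_map_eq_of_vanish _ _ _ List.nodup_range hadjnodup hadjsub
    intro j _ hjadj
    by_cases hji : j = i
    · subst hji
      simp only [condA, Bool.and_eq_true, Bool.or_eq_true, decide_eq_true_eq]
      split_ifs <;> omega
    · have hnotpair : ¬((i, j) ∈ C.keys ∨ (j, i) ∈ C.keys) := fun hp =>
        hjadj ((hadjmem j).mpr ⟨fun he => hji he.symm, hp⟩)
      rw [not_or] at hnotpair
      have hc1 : C.getD (i, j) 0 = 0 := PySem.Dict.getD_of_not_contains _ _ (by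
        cases hcc : C.contains (i, j)
        · rfl
        · exact absurd ((PySem.Dict.contains_iff_mem_keys _ _).mp hcc) hnotpair.1)
      have hc2 : C.getD (j, i) 0 = 0 := PySem.Dict.getD_of_not_contains _ _ (by
        cases hcc : C.contains (j, i)
        · rfl
        · exact absurd ((PySem.Dict.contains_iff_mem_keys _ _).mp hcc) hnotpair.2)
      have ht1 : tgetA T i j = 0 := by rw [hrel]; exact hc1
      have ht2 : tgetA T j i = 0 := by rw [hrel]; exact hc2
      simp only [condA, ht1, ht2, Bool.and_eq_true, Bool.or_eq_true, decide_eq_true_eq]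
      split_ifs <;> first | omega | (simp_all; omega)
  have hmatch : (((adjI : List Nat)).map (fun o =>
        (if C.getD (i, o) 0 > C.getD (o, i) 0 ∨
            (C.getD (i, o) 0 = C.getD (o, i) 0 ∧ N.getD i 0 > N.getD o 0)
          then (1 : Int) else 0)
        + (if N.getD o 0 < N.getD i 0 then (-1 : Int) else 0))).sum
      = (((adjI : List Nat)).map (fun o =>
          (if condA T N i o = true then (1:Int) else 0)
            - (if (decide (N.getD o 0 < N.getD i 0)) = true then (1:Int) else 0))).sum := by
    apply congrArg List.sum
    apply List.map_congr_left
    intro o ho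
    have hio : i ≠ o := ((hadjmem o).mp ho).1
    simp only [condA, hrel i o, hrel o i, Bool.and_eq_true, Bool.or_eq_true,
      decide_eq_true_eq]
    split_ifs <;> omega
  rw [hmatch, hbase, hcA, hsum, hvan]


-- ===== VERDICT (by name: the statement is the Claim_ definition above) =====
theorem solution_spec : Claim_equal_solution := by
  intro friends gifts _ hpre
  unfold Spec_solution
  simp only [solution, solution_alt]
  rw [idxDict_eq friends PySem.Dict.empty]
  set n := friends.length with hn
  set fd := (List.range n).foldl (fun d i => d.insert (friends.getD i "") i)
    PySem.Dict.empty with hfddef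
  have hfd : ∀ a ∈ friends, ∃ v, fd.get? a = some v ∧ v < n :=
    fun a ha => fd_spec friends a ha
  have hpre' : ∀ g ∈ gifts, (pySplitSpace g).length = 2 ∧
      (pySplitSpace g).getD 0 "" ∈ friends ∧ (pySplitSpace g).getD 1 "" ∈ friends :=
    hpre
  have hinv0 : GInv n (List.replicate n (List.replicate n 0), List.replicate n 0)
      (PySem.Dict.empty, List.replicate n 0) := by
    refine ⟨rfl, List.length_replicate, List.length_replicate, ?_, ?_, ?_⟩
    · intro r hr
      rw [List.eq_of_mem_replicate hr]
      exact List.length_replicate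
    · intro a b
      rw [PySem.Dict.getD_empty]
      simp only [tgetA, List.getD_eq_getElem?_getD, List.getElem?_replicate]
      split_ifs <;> simp
    · intro p hp
      rw [PySem.Dict.keys_empty] at hp
      cases hp
  have hinv := gift_inv friends fd n hfd gifts _ _ hpre' hinv0
  set stA := gifts.foldl (giftStepA fd)
    (List.replicate n (List.replicate n 0), List.replicate n 0) with hstA
  set stB := gifts.foldl (giftStepB fd) (PySem.Dict.empty, List.replicate n 0) with hstB
  obtain ⟨hNS, hNlen, hTlen, hrows, hrel, hkeys⟩ := hinv
  have hvalues : ((List.range n).foldl (fun d friend =>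
        (List.range n).foldl (innerStepA stA.1 stA.2 friend) d) PySem.Dict.empty).values
      = (List.range n).filterMap (fun f =>
          if 0 < cA stA.1 stA.2 n f then some (cA stA.1 stA.2 n f) else none) := by
    have hv : ∀ d : PySem.Dict Nat Int, d.values = d.items.map Prod.snd := fun _ => rfl
    rw [hv, outer_items stA.1 stA.2 n n, List.map_filterMap]
    congr 1
    funext f
    split_ifs <;> rfl
  rw [hvalues, maxD_filterMap (cA stA.1 stA.2 n) (fun f => by simp [cA]) n]
  apply PySem.List.foldl_congr_mem'
  intro f hf b
  have hf' : f < n := List.mem_range.mp hf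
  have hpt := point_eq n stA.1 stB.2 stB.1 (by rw [← hNS]; exact hNlen)
    (fun a b' => hrel a b') hkeys f hf'
  rw [hNS, hpt]
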